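-- pv_equiv track=rewrite | github.com/bhattaway/othello_ai | corners.py | check_upleft
-- ===== SOURCE A (Python) =====
-- def check_upleft(board, color, opp_color, row, col):
--     found_opp_color = False
--
--     for i in range(1, len(board)):
--         if row - i < 0 or col - i < 0:
--             break
--
--         spot = board[row-i][col-i]
--         if spot == opp_color:
--             found_opp_color = True
--         elif spot == color and found_opp_color:
--             return True
--         else:
--             return False
--
--     return False
-- ===== SOURCE B (Python) =====
-- def check_upleft(board, color, opp_color, row, col):
--     # Pass 1: collect the up-left diagonal cells inside the board.
--     cells = []
--     i = 1
--     while i < len(board) and row - i >= 0 and col - i >= 0: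
--         cells.append(board[row - i][col - i])
--         i += 1
--     # Pass 2: length of the leading run of opponent cells.
--     k = 0
--     while k < len(cells) and cells[k] == opp_color:
--         k += 1
--     return 1 <= k < len(cells) and cells[k] == color
-- ===== Notes on version B (the rewrite author's own statement) =====
-- stated objective: alternative
-- what changed: B separates traversal from decision: it first collects the bounded up-left diagonal into a list, then measures the leading opponent run k and returns whether k>=1, k<len(cells) and cells[k]==color, instead of A's single stateful loop with a found_opp_color flag and early returns.
-- outside the precondition, e.g. on check_upleft([[], [0, 0], [0, 0, 0]], 7, 5, 2, 2): A returns False, B raises IndexError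
import Mathlib
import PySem

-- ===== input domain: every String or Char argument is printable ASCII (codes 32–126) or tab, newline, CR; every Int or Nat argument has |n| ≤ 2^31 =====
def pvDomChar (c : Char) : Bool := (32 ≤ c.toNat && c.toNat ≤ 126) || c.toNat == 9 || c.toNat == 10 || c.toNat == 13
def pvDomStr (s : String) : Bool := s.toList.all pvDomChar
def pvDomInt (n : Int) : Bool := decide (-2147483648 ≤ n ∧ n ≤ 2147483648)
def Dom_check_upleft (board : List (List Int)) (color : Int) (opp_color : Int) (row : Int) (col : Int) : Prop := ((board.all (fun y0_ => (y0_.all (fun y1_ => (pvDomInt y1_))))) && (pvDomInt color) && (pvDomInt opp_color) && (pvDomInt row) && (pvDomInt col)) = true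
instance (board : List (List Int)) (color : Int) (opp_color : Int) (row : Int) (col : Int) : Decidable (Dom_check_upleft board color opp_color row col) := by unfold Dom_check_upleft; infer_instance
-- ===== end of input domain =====

-- B collects the up-left diagonal into a list, then decides by the length of the leading opponent run (alternative decomposition; same cost).


-- ===== PORT A =====
-- A's for-loop over range(1, len(board)) with the found_opp_color flag and early returns.
def aLoop (board : List (List Int)) (color : Int) (opp_color : Int) (row : Int) (col : Int) : List Int → Bool → Bool
  | [], _ => false
  | i :: rest, found =>
    if row - i < 0 || col - i < 0 then false
    else
      match PySem.List.pyGet? board (row - i) with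
      | none => false   -- IndexError in Python; excluded by Pre_
      | some r =>
        match PySem.List.pyGet? r (col - i) with
        | none => false -- IndexError in Python; excluded by Pre_
        | some spot =>
          if spot == opp_color then aLoop board color opp_color row col rest true
          else if spot == color && found then true
          else false

def check_upleft (board : List (List Int)) (color : Int) (opp_color : Int) (row : Int) (col : Int) : Bool :=
  aLoop board color opp_color row col (PySem.List.pyRange 1 board.length 1) false

-- ===== PORT B =====
-- B's first while-loop: collect the diagonal cells (fuel = len(board) bounds the loop).
def bCells (board : List (List Int)) (row : Int) (col : Int) : Nat → Int → List Int
  | 0, _ => []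
  | fuel + 1, i =>
    if i < (board.length : Int) && 0 ≤ row - i && 0 ≤ col - i then
      PySem.List.pyGetD (PySem.List.pyGetD board (row - i) []) (col - i) 0
        :: bCells board row col fuel (i + 1)
    else []

-- B's second while-loop: length of the leading run equal to opp_color.
def bRun (opp_color : Int) : List Int → Nat
  | [] => 0
  | c :: rest => if c == opp_color then bRun opp_color rest + 1 else 0

def check_upleft_alt (board : List (List Int)) (color : Int) (opp_color : Int) (row : Int) (col : Int) : Bool :=
  let cells := bCells board row col board.length 1
  let k := bRun opp_color cells
  decide (1 ≤ k) && (decide (k < cells.length) && (cells.getD k 0 == color))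

-- ===== PRECONDITION & SPEC =====
-- Pre_ excludes inputs where some reachable diagonal access board[row-i][col-i] is out of range:
-- there Python A raises IndexError (or only avoids it by an early return B does not share).
def Pre_check_upleft (board : List (List Int)) (color : Int) (opp_color : Int) (row : Int) (col : Int) : Prop :=
  ∀ i : Nat, i < board.length → 1 ≤ i → 0 ≤ row - (i : Int) → 0 ≤ col - (i : Int) →
    (row - (i : Int) < (board.length : Int) ∧
     col - (i : Int) < ((board.getD (row - (i : Int)).toNat []).length : Int))
instance (board : List (List Int)) (color : Int) (opp_color : Int) (row : Int) (col : Int) : Decidable (Pre_check_upleft board color opp_color row col) := by unfold Pre_check_upleft; infer_instance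
def pvWitness_check_upleft : List (List Int) × Int × Int × Int × Int := ([[0, 0], [0, 0]], 1, 2, 1, 1)
def Spec_check_upleft (board : List (List Int)) (color : Int) (opp_color : Int) (row : Int) (col : Int) (out : Bool) : Prop := out = check_upleft_alt board color opp_color row col
instance (board : List (List Int)) (color : Int) (opp_color : Int) (row : Int) (col : Int) (out : Bool) : Decidable (Spec_check_upleft board color opp_color row col out) := by unfold Spec_check_upleft; infer_instance

-- ===== CLAIM (what is proved, stated in full; the proofs are below) =====
def Claim_equal_check_upleft : Prop := ∀ (board : List (List Int)) (color : Int) (opp_color : Int) (row : Int) (col : Int), Dom_check_upleft board color opp_color row col → Pre_check_upleft board color opp_color row col → Spec_check_upleft board color opp_color row col (check_upleft board color opp_color row col)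

-- ===== LEMMAS AND PROOFS =====

-- Abstract decision pattern: A's loop body applied to an already-collected list of cells.
def pat (color opp_color : Int) : List Int → Bool → Bool
  | [], _ => false
  | c :: rest, found => if c == opp_color then pat color opp_color rest true else (c == color && found)

-- pat equals the leading-opp-run formula B computes.
theorem pat_eq (color opp_color : Int) (cells : List Int) (found : Bool) :
    pat color opp_color cells found =
      ((decide (1 ≤ bRun opp_color cells) || found) &&
        (decide (bRun opp_color cells < cells.length) && (cells.getD (bRun opp_color cells) 0 == color))) := by
  induction cells generalizing found with
  | nil => simp [pat, bRun]
  | cons c rest ih =>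
    by_cases h : c = opp_color
    · simp [pat, bRun, h, ih true]
    · cases found <;> simp [pat, bRun, h, Bool.and_comm]

-- A's loop on range(i, n) equals pat applied to B's collected cells, under Pre_.
theorem loop_eq (board : List (List Int)) (color opp_color row col : Int)
    (hpre : Pre_check_upleft board color opp_color row col) :
    ∀ (fuel i : Nat), 1 ≤ i → board.length ≤ i + fuel → ∀ found,
      aLoop board color opp_color row col (PySem.List.pyRange (i : Int) (board.length : Int) 1) found
        = pat color opp_color (bCells board row col fuel (i : Int)) found := by
  intro fuel
  induction fuel with
  | zero =>
    intro i h1 hle found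
    rw [PySem.List.pyRange_one_eq_nil (by exact_mod_cast by omega)]
    simp [aLoop, bCells, pat]
  | succ fuel ih =>
    intro i h1 hle found
    by_cases hin : i < board.length
    · rw [PySem.List.pyRange_one_cons (by exact_mod_cast hin)]
      by_cases hb : row - (i : Int) < 0 ∨ col - (i : Int) < 0
      · have hcond : ¬ ((i : Int) < (board.length : Int) && 0 ≤ row - (i : Int) && 0 ≤ col - (i : Int)) = true := by
          simp only [Bool.and_eq_true, decide_eq_true_eq]
          rcases hb with hb | hb <;> intro ⟨⟨_, h2⟩, h3⟩ <;> omega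
        simp only [bCells, if_neg hcond, pat]
        simp only [aLoop]
        rw [if_pos (by rcases hb with hb | hb <;> simp [hb])]
      · push_neg at hb
        obtain ⟨hr, hc⟩ := hb
        obtain ⟨hrow, hcol⟩ := hpre i hin h1 hr hc
        have hrt : (row - (i : Int)).toNat < board.length := by omega
        have hget1 : PySem.List.pyGet? board (row - (i : Int)) = some (board[(row - (i : Int)).toNat]) :=
          PySem.List.pyGet?_eq_some_getElem board hr (by exact_mod_cast hrow)
        have hrowD : board.getD (row - (i : Int)).toNat [] = board[(row - (i : Int)).toNat] :=
          List.getD_eq_getElem board [] hrt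
        have hct : (col - (i : Int)).toNat < (board[(row - (i : Int)).toNat]).length := by
          rw [hrowD] at hcol; omega
        have hget2 : PySem.List.pyGet? (board[(row - (i : Int)).toNat]) (col - (i : Int))
            = some ((board[(row - (i : Int)).toNat])[(col - (i : Int)).toNat]) :=
          PySem.List.pyGet?_eq_some_getElem _ hc (by omega)
        have hcond : ((i : Int) < (board.length : Int) && 0 ≤ row - (i : Int) && 0 ≤ col - (i : Int)) = true := by
          simp only [Bool.and_eq_true, decide_eq_true_eq]
          exact ⟨⟨by exact_mod_cast hin, hr⟩, hc⟩
        have hD1 : PySem.List.pyGetD board (row - (i : Int)) [] = board[(row - (i : Int)).toNat] :=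
          PySem.List.pyGetD_eq_getElem board [] hr (by exact_mod_cast hrow)
        have hD2 : PySem.List.pyGetD (board[(row - (i : Int)).toNat]) (col - (i : Int)) 0
            = (board[(row - (i : Int)).toNat])[(col - (i : Int)).toNat] :=
          PySem.List.pyGetD_eq_getElem _ 0 hc (by omega)
        have hcells : bCells board row col (fuel + 1) (i : Int)
            = (board[(row - (i : Int)).toNat])[(col - (i : Int)).toNat] :: bCells board row col fuel ((i : Int) + 1) := by
          rw [bCells, if_pos hcond, hD1, hD2]
        have hnb : ¬ ((decide (row - (i : Int) < 0) || decide (col - (i : Int) < 0)) = true) := by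
          simp only [Bool.or_eq_true, decide_eq_true_eq, not_or]
          exact ⟨by omega, by omega⟩
        have hstep : ((i : Int) + 1) = ((i + 1 : Nat) : Int) := by push_cast; ring
        rw [hcells]
        simp only [aLoop, hget1, hget2]
        rw [if_neg hnb]
        simp only [pat]
        rw [hstep, ih (i + 1) (by omega) (by omega) true]
        split
        · rfl
        · simp
          rfl
    · rw [PySem.List.pyRange_one_eq_nil (by exact_mod_cast by omega)]
      rw [bCells, if_neg (by simp; intro h; exact absurd (by exact_mod_cast h) hin)]
      simp [aLoop, pat]

-- ===== VERDICT (by name: the statement is the Claim_ definition above) =====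
theorem check_upleft_spec : Claim_equal_check_upleft := by
  intro board color opp_color row col _ hpre
  unfold Spec_check_upleft check_upleft check_upleft_alt
  have h := loop_eq board color opp_color row col hpre board.length 1 (le_refl 1) (by omega) false
  rw [show ((1 : Nat) : Int) = (1 : Int) from rfl] at h
  rw [h, pat_eq]
  simp
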